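-- pv_equiv track=rewrite | github.com/rizvanium/MazeTokenCollector | app/mappers/maze_mapper.py | to_maze
-- ===== SOURCE A (Python) =====
-- brush_to_numerical = {
--     'path': 0,
--     'wall': -1,
--     'agent': -2,
--     'token-common': 1,
--     'token-rare': 2,
--     'token-unique': 5,
--     'token-legendary': 10
-- }
--
-- def to_maze(values: list['str'], size: int) -> list[list[int]]:
--     maze = []
--
--     start = 0
--     for _ in range(size):
--         end = start + size
--         row = values[start: end]
--         maze.append([brush_to_numerical[value] for value in row])
--         start = end
--
--     return maze
-- ===== SOURCE B (Python) =====
-- brush_to_numerical = {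
--     'path': 0,
--     'wall': -1,
--     'agent': -2,
--     'token-common': 1,
--     'token-rare': 2,
--     'token-unique': 5,
--     'token-legendary': 10
-- }
--
-- def to_maze(values, size):
--     if size <= 0:
--         return []
--     maze = [[] for _ in range(size)]
--     for i, v in enumerate(values[:size * size]):
--         maze[i // size].append(brush_to_numerical[v])
--     return maze
-- ===== Notes on version B (the rewrite author's own statement) =====
-- stated objective: alternative
-- what changed: B pre-allocates size empty rows and scatters each consumed value into row i // size in a single enumerate pass (divmod addressing), instead of A's cursor-driven per-row slicing that builds each row by slice-and-translate.
import Mathlib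
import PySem

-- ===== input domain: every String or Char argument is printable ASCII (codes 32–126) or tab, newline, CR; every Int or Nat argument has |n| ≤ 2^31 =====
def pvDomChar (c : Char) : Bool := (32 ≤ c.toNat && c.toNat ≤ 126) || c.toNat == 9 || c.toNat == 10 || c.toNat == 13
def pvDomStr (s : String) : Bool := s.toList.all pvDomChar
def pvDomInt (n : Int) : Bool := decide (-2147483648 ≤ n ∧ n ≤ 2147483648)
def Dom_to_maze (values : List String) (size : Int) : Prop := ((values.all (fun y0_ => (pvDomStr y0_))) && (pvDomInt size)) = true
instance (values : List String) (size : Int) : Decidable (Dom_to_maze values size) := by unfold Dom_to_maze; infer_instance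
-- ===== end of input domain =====

-- B pre-allocates size empty rows and scatters each consumed value into row i // size in one
-- enumerate pass (alternative decomposition; return value only, no mutation).


-- ===== PORT A =====
-- brush_to_numerical, shared module-level dict of both Pythons
def brushDict : PySem.Dict String Int :=
  PySem.Dict.ofList [("path", 0), ("wall", -1), ("agent", -2), ("token-common", 1),
                     ("token-rare", 2), ("token-unique", 5), ("token-legendary", 10)]

-- brush_to_numerical[v]; KeyError (none) is excluded by Pre_, default 0 unreachable there
def brush (v : String) : Int := (brushDict.get? v).getD 0

def to_maze (values : List String) (size : Int) : List (List Int) :=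
  ((PySem.List.pyRange 0 size 1).foldl
    (fun (st : List (List Int) × Int) _ =>
      let e := st.2 + size
      let row := PySem.List.slice values (some st.2) (some e)
      (st.1 ++ [row.map brush], e))
    ([], 0)).1

-- ===== PORT B =====
-- maze[i // size].append(brush_to_numerical[v]); the index i // size is always in range,
-- so List.modify is exact here.
def to_maze_alt (values : List String) (size : Int) : List (List Int) :=
  if size ≤ 0 then []
  else
    (PySem.List.enumerate (PySem.List.slice values none (some (size * size))) 0).foldl
      (fun m iv =>
        m.modify (PySem.Int.floordiv iv.1 size).toNat (fun row => row ++ [brush iv.2]))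
      ((List.range size.toNat).map (fun _ => ([] : List Int)))

-- ===== PRECONDITION & SPEC =====
-- A raises KeyError when a consumed value (one of values[:size*size], for size > 0) is not a
-- brush name; Pre_ excludes exactly those inputs.
def Pre_to_maze (values : List String) (size : Int) : Prop :=
  size ≤ 0 ∨ ∀ v ∈ values.take (size * size).toNat,
    v ∈ ["path", "wall", "agent", "token-common", "token-rare", "token-unique", "token-legendary"]
instance (values : List String) (size : Int) : Decidable (Pre_to_maze values size) := by
  unfold Pre_to_maze; infer_instance

def pvWitness_to_maze : List String × Int :=
  (["path", "wall", "agent", "token-rare"], 2)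

def Spec_to_maze (values : List String) (size : Int) (out : List (List Int)) : Prop := out = to_maze_alt values size
instance (values : List String) (size : Int) (out : List (List Int)) : Decidable (Spec_to_maze values size out) := by unfold Spec_to_maze; infer_instance

-- ===== CLAIM (what is proved, stated in full; the proofs are below) =====
def Claim_equal_to_maze : Prop := ∀ (values : List String) (size : Int), Dom_to_maze values size → Pre_to_maze values size → Spec_to_maze values size (to_maze values size)

-- ===== LEMMAS AND PROOFS =====

-- canonical chunked form both ports are reduced to (rows of l chunked in blocks of n, mapped)
def chunk (l : List String) (n : Nat) : List (List Int) :=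
  (List.range n).map (fun k => ((l.drop (k * n)).take n).map brush)

-- A's loop, generalized: folding k ignored items from cursor s appends k translated rows
theorem to_maze_fold (values : List String) (size : Int) (l : List Int)
    (acc : List (List Int)) (s : Int) :
    (l.foldl
      (fun (st : List (List Int) × Int) _ =>
        (st.1 ++ [(PySem.List.slice values (some st.2) (some (st.2 + size))).map brush],
         st.2 + size))
      (acc, s)).1
    = acc ++ (List.range l.length).map
        (fun (k : Nat) => (PySem.List.slice values (some (s + (k : Int) * size))
                    (some (s + (k : Int) * size + size))).map brush) := by
  induction l generalizing acc s with
  | nil => simp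
  | cons x t ih =>
    rw [List.foldl_cons, ih, List.length_cons, List.range_succ_eq_map, List.map_cons,
      List.map_map, List.append_assoc, List.singleton_append]
    refine congrArg₂ (· ++ ·) rfl ?_
    refine congrArg₂ List.cons (by simp) ?_
    refine List.map_congr_left (fun a _ => ?_)
    simp only [Function.comp_apply, Nat.succ_eq_add_one]
    push_cast
    ring_nf

-- A equals the canonical chunked form (for positive size n)
theorem to_maze_eq_chunk (values : List String) (n : Nat) :
    to_maze values (n : Int) = chunk values n := by
  unfold to_maze chunk
  rw [to_maze_fold values (n : Int) _ [] 0, List.nil_append,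
    PySem.List.length_pyRange_one, Int.sub_zero, Int.toNat_natCast]
  refine List.map_congr_left (fun k hk => ?_)
  simp only [zero_add]
  have e1 : (k : Int) * (n : Int) = ((k * n : Nat) : Int) := by push_cast; ring
  rw [e1, PySem.List.slice_natCast_add]

-- appending one more value scatters it into row l.length / n of the chunked form
theorem chunk_append (l : List String) (x : String) (n : Nat) (hn : 0 < n)
    (hlen : l.length < n * n) :
    chunk (l ++ [x]) n = (chunk l n).modify (l.length / n) (fun row => row ++ [brush x]) := by
  unfold chunk
  apply List.ext_getElem
  · simp
  intro j h1 h2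
  have hj : j < n := by simpa using h1
  rw [List.getElem_modify]
  simp only [List.getElem_map, List.getElem_range]
  set L := l.length with hL
  have hdm : L / n * n + L % n = L := Nat.div_add_mod' L n
  have hmodlt : L % n < n := Nat.mod_lt _ hn
  have hdivlt : L / n < n := Nat.div_lt_of_lt_mul (by omega)
  by_cases hjeq : L / n = j
  · subst hjeq
    rw [if_pos rfl, List.drop_append_of_le_length (by omega)]
    have hlen' : (l.drop (L / n * n)).length = L - L / n * n := by simp [hL]
    rw [List.take_of_length_le (by simp [hlen']; omega),
        List.take_of_length_le (by omega), List.map_append, List.map_singleton]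
  · rw [if_neg hjeq]
    rcases Nat.lt_or_ge j (L / n) with hlt | hge
    · -- block entirely inside l
      have hstep : (j + 1) * n ≤ L / n * n := Nat.mul_le_mul_right n (by omega)
      have hexp : (j + 1) * n = j * n + n := by ring
      have hfit : j * n + n ≤ L := by omega
      rw [List.drop_append_of_le_length (by omega),
          List.take_append_of_le_length (by simp; omega)]
    · -- block entirely past l ++ [x]
      have hstep : (L / n + 1) * n ≤ j * n := Nat.mul_le_mul_right n (by omega)
      have hexp : (L / n + 1) * n = L / n * n + n := by ring
      have hpast : L + 1 ≤ j * n := by omega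
      rw [List.drop_of_length_le (by simp; omega), List.drop_of_length_le (by omega)]

-- B's scatter fold over an enumerated list equals the chunked form
theorem scatter_fold (n : Nat) (hn : 0 < n) (l : List String) (hlen : l.length ≤ n * n) :
    (PySem.List.enumerate l 0).foldl
      (fun m iv =>
        m.modify (PySem.Int.floordiv iv.1 (n : Int)).toNat (fun row => row ++ [brush iv.2]))
      ((List.range n).map (fun _ => ([] : List Int)))
    = chunk l n := by
  induction l using List.reverseRecOn with
  | nil =>
    simp [PySem.List.enumerate, chunk]
  | append_singleton ys x ih =>
    have hys : ys.length < n * n := by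
      have := hlen; simp at this; omega
    rw [PySem.List.enumerate_append, List.foldl_append, ih (by omega)]
    simp only [PySem.List.enumerate_cons, PySem.List.enumerate_nil, List.foldl_cons,
      List.foldl_nil, zero_add]
    rw [chunk_append ys x n hn hys]
    congr 1
    have : PySem.Int.floordiv ((ys.length : Int)) ((n : Int)) = ((ys.length / n : Nat) : Int) :=
      PySem.Int.floordiv_natCast _ _
    rw [this, Int.toNat_natCast]

theorem to_maze_spec_aux (values : List String) (size : Int) :
    to_maze values size = to_maze_alt values size := by
  unfold to_maze_alt
  by_cases hle : size ≤ 0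
  · rw [if_pos hle]
    unfold to_maze
    have hz : (size - 0).toNat = 0 := by omega
    rw [PySem.List.pyRange_one, hz]
    simp
  · rw [if_neg hle]
    obtain ⟨n, rfl⟩ : ∃ n : Nat, size = (n : Int) := ⟨size.toNat, by omega⟩
    have hn : 0 < n := by omega
    have e5 : (n : Int) * (n : Int) = ((n * n : Nat) : Int) := by push_cast; ring
    rw [e5, PySem.List.slice_to_natCast, Int.toNat_natCast,
      scatter_fold n hn (values.take (n * n)) (by simp),
      to_maze_eq_chunk values n]
    unfold chunk
    refine List.map_congr_left (fun k hk => ?_)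
    rw [List.mem_range] at hk
    rw [List.drop_take, List.take_take]
    have h1 : (k + 1) * n ≤ n * n := Nat.mul_le_mul_right n (by omega)
    have h2 : (k + 1) * n = k * n + n := by ring
    have h3 : min n (n * n - k * n) = n := by omega
    rw [h3]

-- ===== VERDICT (by name: the statement is the Claim_ definition above) =====
theorem to_maze_spec : Claim_equal_to_maze := by
  intro values size _ _
  exact to_maze_spec_aux values size
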